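-- pv_equiv track=rewrite | github.com/billyio/atcoder | ABC000-050/ABC002/abc002_d.py | k_clique_solve
-- ===== SOURCE A (Python) =====
-- from itertools import combinations as comb
--
-- def k_clique_solve(relation, max_members, k):
--     for members in comb(max_members,k):
--         for r in comb(members,2):
--             if r in relation:
--                 continue
--             break
--         else:
--             return True
--     else:
--         return False
-- ===== SOURCE B (Python) =====
-- def k_clique_solve(relation, max_members, k):
--     relset = set(relation)
--     mm = list(max_members)
--     n = len(mm)
--
--     def grow(clique, start):
--         if len(clique) == k:
--             return True
--         for i in range(start, n):
--             x = mm[i]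
--             if all((y, x) in relset for y in clique):
--                 clique.append(x)
--                 if grow(clique, i + 1):
--                     return True
--                 clique.pop()
--         return False
--
--     return grow([], 0)
-- ===== Notes on version B (the rewrite author's own statement) =====
-- stated objective: alternative
-- what changed: Replaces itertools-style enumeration of all C(n,k) member subsets (each checked pair-by-pair) with a recursive backtracking search that grows a clique along the original element order and prunes a branch as soon as a candidate fails a pair test against the current clique, using a set of the relation for membership.
import Mathlib
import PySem

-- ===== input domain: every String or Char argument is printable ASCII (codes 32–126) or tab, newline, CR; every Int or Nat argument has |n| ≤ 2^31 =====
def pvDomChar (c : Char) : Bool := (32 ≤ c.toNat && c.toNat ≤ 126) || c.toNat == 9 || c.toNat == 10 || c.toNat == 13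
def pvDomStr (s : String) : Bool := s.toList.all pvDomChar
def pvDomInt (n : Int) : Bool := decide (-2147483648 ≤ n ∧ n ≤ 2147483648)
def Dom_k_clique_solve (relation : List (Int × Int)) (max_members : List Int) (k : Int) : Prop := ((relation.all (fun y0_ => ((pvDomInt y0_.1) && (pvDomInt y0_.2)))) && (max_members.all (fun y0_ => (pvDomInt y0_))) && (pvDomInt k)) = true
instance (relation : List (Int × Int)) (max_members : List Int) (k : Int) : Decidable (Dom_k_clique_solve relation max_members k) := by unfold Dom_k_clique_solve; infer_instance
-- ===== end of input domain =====

-- B replaces the exhaustive enumeration of all C(n,k) subsets by a recursive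
-- backtracking search that grows a clique and prunes as soon as a candidate
-- fails a pair test (objective: alternative algorithm; exact same results).

-- ===== PORT A =====
-- itertools.combinations over a list, in itertools' order
def pyComb : List Int → Nat → List (List Int)
  | _, 0 => [[]]
  | [], _ + 1 => []
  | x :: xs, n + 1 => (pyComb xs n).map (x :: ·) ++ pyComb xs (n + 1)

-- comb(members, 2) specialised: all (earlier, later) pairs in order
def pairs2 : List Int → List (Int × Int)
  | [] => []
  | x :: xs => xs.map (fun y => (x, y)) ++ pairs2 xs

def k_clique_solve (relation : List (Int × Int)) (max_members : List Int) (k : Int) : Bool :=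
  (pyComb max_members k.toNat).any (fun members =>
    (pairs2 members).all (fun r => relation.contains r))

-- ===== PORT B =====
-- grow(clique, start): backtracking over the remaining suffix of max_members
def btAlt (relset : List (Int × Int)) (k : Int) : List Int → List Int → Bool
  | [], clique => if (clique.length : Int) == k then true else false
  | x :: xs, clique =>
    if (clique.length : Int) == k then true
    else
      (if clique.all (fun y => PySem.Set.contains relset (y, x)) then
          btAlt relset k xs (clique ++ [x])
        else false) || btAlt relset k xs clique

def k_clique_solve_alt (relation : List (Int × Int)) (max_members : List Int) (k : Int) : Bool :=
  btAlt (PySem.Set.ofList relation) k max_members []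

-- ===== PRECONDITION & SPEC =====
-- Pre_ excludes k < 0, where Python's combinations(mm, k) raises ValueError.
def Pre_k_clique_solve (relation : List (Int × Int)) (max_members : List Int) (k : Int) : Prop := 0 ≤ k
instance (relation : List (Int × Int)) (max_members : List Int) (k : Int) : Decidable (Pre_k_clique_solve relation max_members k) := by unfold Pre_k_clique_solve; infer_instance
def pvWitness_k_clique_solve : (List (Int × Int)) × List Int × Int := ([(1, 2)], [1, 2], 2)

def Spec_k_clique_solve (relation : List (Int × Int)) (max_members : List Int) (k : Int) (out : Bool) : Prop := out = k_clique_solve_alt relation max_members k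
instance (relation : List (Int × Int)) (max_members : List Int) (k : Int) (out : Bool) : Decidable (Spec_k_clique_solve relation max_members k out) := by unfold Spec_k_clique_solve; infer_instance

-- ===== CLAIM (what is proved, stated in full; the proofs are below) =====
def Claim_equal_k_clique_solve : Prop := ∀ (relation : List (Int × Int)) (max_members : List Int) (k : Int), Dom_k_clique_solve relation max_members k → Pre_k_clique_solve relation max_members k → Spec_k_clique_solve relation max_members k (k_clique_solve relation max_members k)

-- ===== LEMMAS AND PROOFS =====

-- 'all ordered pairs of c are in rel', the inner test of A
def goodB (rel : List (Int × Int)) (c : List Int) : Bool :=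
  (pairs2 c).all (fun r => rel.contains r)

theorem goodB_append (rel : List (Int × Int)) (a b : List Int) :
    goodB rel (a ++ b) = true ↔
      (goodB rel a = true ∧ (∀ y ∈ a, ∀ z ∈ b, rel.contains (y, z) = true) ∧ goodB rel b = true) := by
  induction a with
  | nil => simp [goodB, pairs2]
  | cons x xs ih =>
    simp only [goodB, pairs2, List.cons_append, List.all_append, List.all_map,
      Bool.and_eq_true, List.all_eq_true, List.forall_mem_cons, Function.comp] at *
    tauto

theorem setContains_eq (rel : List (Int × Int)) (p : Int × Int) :
    PySem.Set.contains (PySem.Set.ofList rel) p = rel.contains p := by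
  rw [Bool.eq_iff_iff, PySem.Set.contains_iff, PySem.Set.mem_ofList, List.contains_iff_mem]

theorem bt_iff (rel : List (Int × Int)) (kn : Nat) :
    ∀ (rest clique : List Int), goodB rel clique = true → clique.length ≤ kn →
      (btAlt (PySem.Set.ofList rel) (kn : Int) rest clique = true ↔
        ∃ ext ∈ pyComb rest (kn - clique.length), goodB rel (clique ++ ext) = true) := by
  intro rest
  induction rest with
  | nil =>
    intro clique hg hle
    by_cases h : clique.length = kn
    · subst h
      simp [btAlt, pyComb, hg]
    · have hlt : clique.length < kn := lt_of_le_of_ne hle h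
      obtain ⟨m, hm⟩ : ∃ m, kn - clique.length = m + 1 := ⟨kn - clique.length - 1, by omega⟩
      rw [btAlt]
      simp [hm, pyComb, h]
  | cons x xs ih =>
    intro clique hg hle
    by_cases h : clique.length = kn
    · subst h
      rw [btAlt]
      simp [pyComb, hg]
    · have hlt : clique.length < kn := lt_of_le_of_ne hle h
      obtain ⟨m, hm⟩ : ∃ m, kn - clique.length = m + 1 := ⟨kn - clique.length - 1, by omega⟩
      rw [btAlt]
      simp only [beq_iff_eq, Nat.cast_inj, h, if_false, hm, pyComb, List.mem_append,
        List.mem_map, Bool.or_eq_true]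
      by_cases hok : clique.all (fun y => rel.contains (y, x)) = true
      · have hok' : clique.all (fun y => PySem.Set.contains (PySem.Set.ofList rel) (y, x)) = true := by
          rw [List.all_eq_true] at *
          intro y hy; rw [setContains_eq]; exact hok y hy
        have hg1 : goodB rel (clique ++ [x]) = true := by
          rw [goodB_append]
          refine ⟨hg, ?_, by simp [goodB, pairs2]⟩
          intro y hy z hz
          rw [List.mem_singleton] at hz; subst hz
          exact (List.all_eq_true.mp hok) y hy
        have h1 := ih (clique ++ [x]) hg1 (by simp; omega)
        have h2 := ih clique hg hle
        have hm1 : kn - (clique ++ [x]).length = m := by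
          simp only [List.length_append, List.length_cons, List.length_nil]; omega
        rw [hm1] at h1
        rw [hm] at h2
        rw [hok', if_pos rfl]
        constructor
        · rintro (hbt | hbt)
          · obtain ⟨e, he, hge⟩ := h1.mp hbt
            exact ⟨x :: e, Or.inl ⟨e, he, rfl⟩, by simpa using hge⟩
          · obtain ⟨e, he, hge⟩ := h2.mp hbt
            exact ⟨e, Or.inr he, hge⟩
        · rintro ⟨e, (⟨e', he', rfl⟩ | he), hge⟩
          · exact Or.inl (h1.mpr ⟨e', he', by simpa using hge⟩)
          · exact Or.inr (h2.mpr ⟨e, he, hge⟩)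
      · have hok' : clique.all (fun y => PySem.Set.contains (PySem.Set.ofList rel) (y, x)) = false := by
          rw [Bool.eq_false_iff]
          intro hc
          apply hok
          rw [List.all_eq_true] at *
          intro y hy; rw [← setContains_eq]; exact hc y hy
        have h2 := ih clique hg hle
        rw [hm] at h2
        rw [hok', if_neg Bool.false_ne_true]
        constructor
        · rintro (hc | hbt)
          · exact absurd hc Bool.false_ne_true
          · obtain ⟨e, he, hge⟩ := h2.mp hbt
            exact ⟨e, Or.inr he, hge⟩
        · rintro ⟨e, (⟨e', he', rfl⟩ | he), hge⟩
          · exfalso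
            apply hok
            have := (goodB_append rel clique (x :: e')).mp (by simpa using hge)
            rw [List.all_eq_true]
            intro y hy
            exact this.2.1 y hy x List.mem_cons_self
          · exact Or.inr (h2.mpr ⟨e, he, hge⟩)

-- ===== VERDICT (by name: the statement is the Claim_ definition above) =====
theorem k_clique_solve_spec : Claim_equal_k_clique_solve := by
  intro relation max_members k _ hpre
  unfold Spec_k_clique_solve k_clique_solve k_clique_solve_alt
  obtain ⟨kn, rfl⟩ : ∃ kn : Nat, k = (kn : Int) := ⟨k.toNat, (Int.toNat_of_nonneg hpre).symm⟩
  rw [Bool.eq_iff_iff, List.any_eq_true, Int.toNat_natCast,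
    bt_iff relation kn max_members [] (by simp [goodB, pairs2]) (by simp)]
  simp [goodB]
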